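-- pv_equiv track=rewrite | github.com/zkyhhh/personal_chess_games | chinese_chess.py | kings_face_each_other
-- ===== SOURCE A (Python) =====
-- from typing import List, Optional, Tuple
--
-- Board = List[List[str]]
--
-- def find_king(board: Board, side: str) -> Optional[Tuple[int, int]]:
--     target = "K" if side == "red" else "k"
--     for r in range(10):
--         for c in range(9):
--             if board[r][c] == target:
--                 return r, c
--     return None
--
-- def kings_face_each_other(board: Board) -> bool:
--     rk = find_king(board, "red")
--     bk = find_king(board, "black")
--     if not rk or not bk:
--         return False
--     rr, rc = rk
--     br, bc = bk
--     if rc != bc: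
--         return False
--     lo, hi = sorted((rr, br))
--     for r in range(lo + 1, hi):
--         if board[r][rc] != ".":
--             return False
--     return True
-- ===== SOURCE B (Python) =====
-- def kings_face_each_other(board):
--     # Work with 1-D cell indices over the 10x9 grid (cell i is board[i//9][i%9]):
--     # a recursive scan finds each king's linear index, % 9 compares columns, and
--     # the corridor between the kings is the stride-9 run of indices.
--     def scan(target, i=0):
--         if i == 90:
--             return None
--         if board[i // 9][i % 9] == target:
--             return i
--         return scan(target, i + 1)
--
--     ki = scan("K")
--     bi = scan("k")
--     if ki is None or bi is None:
--         return False
--     if ki % 9 != bi % 9: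
--         return False
--     lo, hi = min(ki, bi), max(ki, bi)
--     return all(board[i // 9][i % 9] == "." for i in range(lo + 9, hi, 9))
-- ===== Notes on version B (the rewrite author's own statement) =====
-- stated objective: alternative
-- what changed: B linearises the 10x9 grid into single 1-D cell indices (cell i is board[i//9][i%9]): a recursive scan over one index finds each king's linear position, % 9 compares columns, and the corridor between the kings is checked with all() over a stride-9 index range, replacing A's nested row/column for-loops and its explicit between-rows clearance loop.
import Mathlib
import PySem

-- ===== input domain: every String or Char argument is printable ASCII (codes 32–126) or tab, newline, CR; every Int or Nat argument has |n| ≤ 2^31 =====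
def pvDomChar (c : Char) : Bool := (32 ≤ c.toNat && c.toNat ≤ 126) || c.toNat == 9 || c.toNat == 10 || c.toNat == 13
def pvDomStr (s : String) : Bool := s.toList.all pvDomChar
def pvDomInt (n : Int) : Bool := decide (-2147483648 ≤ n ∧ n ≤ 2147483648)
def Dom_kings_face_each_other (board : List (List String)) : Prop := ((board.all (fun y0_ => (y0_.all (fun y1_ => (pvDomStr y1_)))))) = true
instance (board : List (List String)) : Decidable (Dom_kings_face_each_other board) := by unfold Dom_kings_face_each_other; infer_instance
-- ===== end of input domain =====

-- B linearises the 10×9 grid into 1-D cell indices (cell i is board[i//9][i%9]): one recursive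
-- scan per king over a single index, % 9 for the column, a stride-9 index range for the corridor,
-- instead of A's nested row/column loops; same return value wherever A returns.

-- ===== PORT A =====
-- board[r][c] (Pre_ keeps every access in range; the "" default never fires there)
def pvCell (board : List (List String)) (r c : Int) : String :=
  (PySem.List.pyGet? ((PySem.List.pyGet? board r).getD []) c).getD ""

-- inner 'for c in range(9)' of find_king, with early return
def fkCols (board : List (List String)) (target : String) (r : Int) (c : Nat) : Option (Int × Int) :=
  if c < 9 then
    if pvCell board r (c : Int) == target then some (r, (c : Int))
    else fkCols board target r (c + 1)
  else none
termination_by 9 - c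

-- outer 'for r in range(10)' of find_king
def fkRows (board : List (List String)) (target : String) (r : Nat) : Option (Int × Int) :=
  if r < 10 then
    match fkCols board target (r : Int) 0 with
    | some p => some p
    | none => fkRows board target (r + 1)
  else none
termination_by 10 - r

def find_king (board : List (List String)) (side : String) : Option (Int × Int) :=
  let target := if side == "red" then "K" else "k"
  fkRows board target 0

-- 'for r in range(lo+1, hi): if board[r][rc] != ".": return False' then True
def clearA (board : List (List String)) (col r hi : Int) : Bool :=
  if h : r < hi then
    if pvCell board r col != "." then false else clearA board col (r + 1) hi
  else true
termination_by (hi - r).toNat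
decreasing_by omega

def kings_face_each_other (board : List (List String)) : Bool :=
  match find_king board "red", find_king board "black" with
  | some (rr, rc), some (br, bc) =>
    if rc ≠ bc then false
    else clearA board rc (min rr br + 1) (max rr br)   -- lo, hi = sorted((rr, br))
  | _, _ => false

-- ===== PORT B =====
-- B's recursive scan over the linear cell index i (0 ≤ i, so Python's i//9, i%9 are Nat / and %);
-- board[i//9][i%9] with the "" default exactly where Pre_ already rules the access in range
def scanB (board : List (List String)) (target : String) (i : Nat) : Option Nat :=
  if i < 90 then   -- Python tests 'i == 90'; the scan only reaches i ≤ 90, where the two guards agree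
    if (PySem.List.pyGet? ((PySem.List.pyGet? board ((i / 9 : Nat) : Int)).getD [])
        ((i % 9 : Nat) : Int)).getD "" == target then some i
    else scanB board target (i + 1)
  else none
termination_by 90 - i

def kings_face_each_other_alt (board : List (List String)) : Bool :=
  match scanB board "K" 0 with                 -- ki = scan("K")
  | none => false                              -- ki is None → False
  | some ki =>
    match scanB board "k" 0 with               -- bi = scan("k")
    | none => false                            -- bi is None → False
    | some bi =>
      if ki % 9 ≠ bi % 9 then false
      else
        let lo := min ki bi
        let hi := max ki bi
        (PySem.List.pyRange ((lo : Int) + 9) ((hi : Int)) 9).all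
          (fun i => (PySem.List.pyGet? ((PySem.List.pyGet? board (PySem.Int.floordiv i 9)).getD [])
            (PySem.Int.mod i 9)).getD "" == ".")

-- ===== PRECONDITION & SPEC =====
-- row r is 'defective' for a 10×9 scan: it is missing or has fewer than 9 cells
def pvBadRow (board : List (List String)) (r : Nat) : Prop :=
  board.length ≤ r ∨ (board.getD r []).length < 9

-- a row-major scan of the 10×9 grid for t completes without IndexError: either no row among the
-- first 10 is defective, or t occurs strictly before the first defective cell
def pvScanOK (board : List (List String)) (t : String) : Prop :=
  (∀ r ∈ List.range 10, ¬ pvBadRow board r) ∨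
  (∃ R ∈ List.range 10, pvBadRow board R ∧ (∀ r ∈ List.range R, ¬ pvBadRow board r) ∧
    ((∃ r ∈ List.range R, ∃ c ∈ List.range 9, (board.getD r []).getD c "" = t) ∨
     (R < board.length ∧ ∃ c ∈ List.range (board.getD R []).length,
        (board.getD R []).getD c "" = t)))

-- Pre_ is exactly the inputs on which the Python A returns: both find_king scans complete without
-- IndexError (the later facing-check only reads cells those scans already visited)
def Pre_kings_face_each_other (board : List (List String)) : Prop :=
  pvScanOK board "K" ∧ pvScanOK board "k"
instance (board : List (List String)) : Decidable (Pre_kings_face_each_other board) := by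
  unfold Pre_kings_face_each_other pvScanOK pvBadRow; infer_instance

def pvWitness_kings_face_each_other : List (List String) :=
  List.replicate 10 (List.replicate 9 ".")

def Spec_kings_face_each_other (board : List (List String)) (out : Bool) : Prop :=
  out = kings_face_each_other_alt board
instance (board : List (List String)) (out : Bool) : Decidable (Spec_kings_face_each_other board out) := by
  unfold Spec_kings_face_each_other; infer_instance

-- ===== CLAIM (what is proved, stated in full; the proofs are below) =====
def Claim_equal_kings_face_each_other : Prop :=
  ∀ (board : List (List String)), Dom_kings_face_each_other board →
    Pre_kings_face_each_other board →
    Spec_kings_face_each_other board (kings_face_each_other board)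

-- ===== LEMMAS AND PROOFS =====

-- board[r][c] through Nat coordinates, with the same "" default both ports use
def cellN (board : List (List String)) (r c : Nat) : String :=
  (board.getD r []).getD c ""

theorem pvCell_natCast (board : List (List String)) (r c : Nat) :
    pvCell board (r : Int) (c : Int) = cellN board r c := by
  simp [pvCell, cellN, List.getD_eq_getElem?_getD]

-- first column ≥ c of row r holding t, the common shape of A's inner loop and B's scan inside a row
def fcP (board : List (List String)) (t : String) (r c : Nat) : Option Nat :=
  if c < 9 then
    if cellN board r c == t then some c else fcP board t r (c + 1)
  else none
termination_by 9 - c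

theorem fcP_bounds (board : List (List String)) (t : String) (r : Nat) :
    ∀ (m c j : Nat), c + m = 9 → fcP board t r c = some j → c ≤ j ∧ j < 9 := by
  intro m
  induction m with
  | zero =>
    intro c j hc h
    rw [fcP, if_neg (by omega)] at h
    exact absurd h (by simp)
  | succ k ih =>
    intro c j hc h
    rw [fcP, if_pos (by omega : c < 9)] at h
    by_cases hv : cellN board r c == t
    · rw [if_pos hv] at h
      cases h
      omega
    · rw [if_neg hv] at h
      have := ih (c + 1) j (by omega) h
      omega

-- A's inner loop computes fcP, tagged with its row
theorem fkCols_eq_fcP (board : List (List String)) (t : String) (r : Nat) :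
    ∀ (m c : Nat), c + m = 9 →
    fkCols board t (r : Int) c = (fcP board t r c).map (fun j => ((r : Int), (j : Int))) := by
  intro m
  induction m with
  | zero =>
    intro c hc
    rw [fkCols, if_neg (by omega), fcP, if_neg (by omega)]
    rfl
  | succ k ih =>
    intro c hc
    rw [fkCols, if_pos (by omega : c < 9), fcP, if_pos (by omega : c < 9), pvCell_natCast]
    by_cases hv : cellN board r c == t
    · rw [if_pos hv, if_pos hv]
      rfl
    · rw [if_neg hv, if_neg hv]
      exact ih (c + 1) (by omega)

-- B's linear scan, entered at cell (r, c), computes fcP inside row r and then moves to row r+1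
theorem scanB_row (board : List (List String)) (t : String) (r : Nat) (hr : r < 10) :
    ∀ (m c : Nat), c + m = 9 →
    scanB board t (9 * r + c)
      = (match fcP board t r c with
         | some j => some (9 * r + j)
         | none => scanB board t (9 * (r + 1))) := by
  intro m
  induction m with
  | zero =>
    intro c hc
    rw [fcP, if_neg (by omega), show 9 * r + c = 9 * (r + 1) from by omega]
  | succ k ih =>
    intro c hc
    have hi90 : 9 * r + c < 90 := by omega
    have hdiv : (9 * r + c) / 9 = r := by omega
    have hmod : (9 * r + c) % 9 = c := by omega
    rw [scanB, if_pos hi90, hdiv, hmod, fcP, if_pos (by omega : c < 9)]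
    have hcell : (PySem.List.pyGet? ((PySem.List.pyGet? board ((r : Nat) : Int)).getD [])
        ((c : Nat) : Int)).getD "" = cellN board r c := pvCell_natCast board r c
    rw [hcell]
    by_cases hv : cellN board r c == t
    · rw [if_pos hv, if_pos hv]
    · rw [if_neg hv, if_neg hv, show 9 * r + c + 1 = 9 * r + (c + 1) from by omega]
      exact ih (c + 1) (by omega)

-- A's row loop = B's linear scan, read back through divmod
theorem fkRows_eq_scanB (board : List (List String)) (t : String) :
    ∀ (n r : Nat), r + n = 10 →
    fkRows board t r
      = (scanB board t (9 * r)).map (fun i => (((i / 9 : Nat) : Int), ((i % 9 : Nat) : Int))) := by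
  intro n
  induction n with
  | zero =>
    intro r hr
    rw [fkRows, if_neg (by omega), show 9 * r = 90 from by omega, scanB,
      if_neg (by omega : ¬ (90 : Nat) < 90)]
    rfl
  | succ m ih =>
    intro r hr
    rw [fkRows, if_pos (by omega : r < 10), fkCols_eq_fcP board t r 9 0 rfl,
      show (9 * r : Nat) = 9 * r + 0 from by omega, scanB_row board t r (by omega) 9 0 rfl]
    cases hf : fcP board t r 0 with
    | none => exact ih (r + 1) (by omega)
    | some j =>
      obtain ⟨-, hj9⟩ := fcP_bounds board t r 9 0 j rfl hf
      simp only [Option.map_some]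
      rw [show (9 * r + j) / 9 = r from by omega, show (9 * r + j) % 9 = j from by omega]
      simp

-- Bool.all respects pointwise equality on members
theorem all_congr_mem {α : Type} {l : List α} {p q : α → Bool}
    (h : ∀ x ∈ l, p x = q x) : l.all p = l.all q := by
  induction l with
  | nil => rfl
  | cons x xs ih =>
    simp only [List.all_cons]
    rw [h x List.mem_cons_self, ih (fun y hy => h y (List.mem_cons_of_mem _ hy))]

-- the stride-9 index range over the grid IS the 1-step row range, shifted into 1-D indices
theorem stride_eq_rows (lo hi lor hir c : Nat) (hlo : lo = 9 * lor + c) (hhi : hi = 9 * hir + c) :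
    PySem.List.pyRange ((lo : Int) + 9) (hi : Int) 9
      = (PySem.List.pyRange ((lor : Int) + 1) (hir : Int) 1).map (fun r => 9 * r + (c : Int)) := by
  rw [PySem.List.pyRange_of_pos _ _ (by omega : (0:Int) < 9), PySem.List.pyRange_one,
    List.map_map]
  have hlen : (if (lo : Int) + 9 < (hi : Int) then ((((hi : Int)) - ((lo : Int) + 9) + 9 - 1) / 9).toNat else 0)
      = (((hir : Int)) - (((lor : Int)) + 1)).toNat := by
    subst hlo hhi
    by_cases hd : lor + 2 ≤ hir
    · rw [if_pos (by push_cast; omega)]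
      have : ((9 * hir + c : Nat) : Int) - (((9 * lor + c : Nat) : Int) + 9) + 9 - 1
          = 9 * ((hir : Int) - lor - 1) + 8 := by push_cast; ring
      rw [this]
      have h9 : (9 * ((hir : Int) - lor - 1) + 8) / 9 = (hir : Int) - lor - 1 := by
        omega
      rw [h9]
      omega
    · rw [if_neg (by push_cast; omega)]
      omega
  rw [hlen]
  apply List.map_congr_left
  intro k _
  simp only [Function.comp]
  subst hlo hhi
  push_cast
  ring

-- A's early-exit clearance loop as an all() over the 1-step row range
theorem clear_eq_all (board : List (List String)) (col : Int) :
    ∀ (n : Nat) (r hi : Int), (hi - r).toNat = n →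
    clearA board col r hi = (PySem.List.pyRange r hi 1).all (fun x => pvCell board x col == ".") := by
  intro n
  induction n with
  | zero =>
    intro r hi hn
    rw [PySem.List.pyRange_one_eq_nil (by omega), clearA, dif_neg (show ¬ r < hi by omega)]
    rfl
  | succ m ih =>
    intro r hi hn
    have hlt : r < hi := by omega
    rw [PySem.List.pyRange_one_cons hlt, clearA, dif_pos hlt, ih (r + 1) hi (by omega)]
    simp only [List.all_cons]
    cases hv : pvCell board r col == "." with
    | true =>
      rw [show (pvCell board r col != ".") = !(pvCell board r col == ".") from rfl, hv]
      rfl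
    | false =>
      rw [show (pvCell board r col != ".") = !(pvCell board r col == ".") from rfl, hv]
      rfl

-- the facing corridor: A's 2-D clearance loop = B's stride-9 1-D all()
theorem corridor_eq (board : List (List String)) (lor hir cN : Nat) (hc : cN < 9) :
    clearA board ((cN : Nat) : Int) (((lor : Nat) : Int) + 1) ((hir : Nat) : Int)
      = (PySem.List.pyRange (((9 * lor + cN : Nat) : Int) + 9) ((9 * hir + cN : Nat) : Int) 9).all
          (fun i => (PySem.List.pyGet? ((PySem.List.pyGet? board (PySem.Int.floordiv i 9)).getD [])
            (PySem.Int.mod i 9)).getD "" == ".") := by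
  rw [clear_eq_all board _ (((hir : Nat) : Int) - (((lor : Nat) : Int) + 1)).toNat _ _ rfl,
    stride_eq_rows (9 * lor + cN) (9 * hir + cN) lor hir cN rfl rfl, List.all_map]
  apply all_congr_mem
  intro x hx
  have hb := (PySem.List.mem_pyRange_one).mp hx
  have hx0 : 0 ≤ x := by omega
  obtain ⟨xn, rfl⟩ := Int.eq_ofNat_of_zero_le hx0
  simp only [Function.comp]
  have hidx : 9 * ((xn : Nat) : Int) + ((cN : Nat) : Int) = ((9 * xn + cN : Nat) : Int) := by
    push_cast; ring
  have hfd : PySem.Int.floordiv ((9 * xn + cN : Nat) : Int) 9 = ((xn : Nat) : Int) := by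
    have h := PySem.Int.floordiv_natCast (9 * xn + cN) 9
    rw [show (9 * xn + cN) / 9 = xn from by omega] at h
    exact_mod_cast h
  have hmd : PySem.Int.mod ((9 * xn + cN : Nat) : Int) 9 = ((cN : Nat) : Int) := by
    have h := PySem.Int.mod_natCast (9 * xn + cN) 9
    rw [show (9 * xn + cN) % 9 = cN from by omega] at h
    exact_mod_cast h
  rw [hidx, hfd, hmd]
  have : (PySem.List.pyGet? ((PySem.List.pyGet? board ((xn : Nat) : Int)).getD [])
      ((cN : Nat) : Int)).getD "" = pvCell board ((xn : Nat) : Int) ((cN : Nat) : Int) := rfl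
  rw [this]

-- ===== VERDICT (by name: the statement is the Claim_ definition above) =====
theorem kings_face_each_other_spec : Claim_equal_kings_face_each_other := by
  intro board _ _
  have e1 : find_king board "red" = fkRows board "K" 0 := rfl
  have e2 : find_king board "black" = fkRows board "k" 0 := rfl
  show kings_face_each_other board = kings_face_each_other_alt board
  unfold kings_face_each_other kings_face_each_other_alt
  rw [e1, e2, fkRows_eq_scanB board "K" 10 0 rfl, fkRows_eq_scanB board "k" 10 0 rfl]
  cases hK : scanB board "K" (9 * 0) with
  | none =>
    cases scanB board "k" (9 * 0) <;>
      simp only [Option.map_none, Option.map_some]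
  | some ki =>
    cases hk : scanB board "k" (9 * 0) with
    | none => simp only [Option.map_none, Option.map_some]
    | some bi =>
      simp only [Option.map_some]
      show (if ((ki % 9 : Nat) : Int) ≠ ((bi % 9 : Nat) : Int) then false
            else clearA board ((ki % 9 : Nat) : Int)
              (min ((ki / 9 : Nat) : Int) ((bi / 9 : Nat) : Int) + 1)
              (max ((ki / 9 : Nat) : Int) ((bi / 9 : Nat) : Int)))
        = _
      by_cases hcol : ki % 9 = bi % 9
      · rw [if_neg (show ¬ ((ki % 9 : Nat) : Int) ≠ ((bi % 9 : Nat) : Int) from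
            fun h => h (by exact_mod_cast hcol)),
          if_neg (show ¬ ki % 9 ≠ bi % 9 from fun h => h hcol)]
        have hmin : min ((ki / 9 : Nat) : Int) ((bi / 9 : Nat) : Int)
            = ((min (ki / 9) (bi / 9) : Nat) : Int) := by rw [Nat.cast_min]
        have hmax : max ((ki / 9 : Nat) : Int) ((bi / 9 : Nat) : Int)
            = ((max (ki / 9) (bi / 9) : Nat) : Int) := by rw [Nat.cast_max]
        have hlo : min ki bi = 9 * min (ki / 9) (bi / 9) + ki % 9 := by omega
        have hhi : max ki bi = 9 * max (ki / 9) (bi / 9) + ki % 9 := by omega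
        rw [hmin, hmax, hlo, hhi]
        exact corridor_eq board (min (ki / 9) (bi / 9)) (max (ki / 9) (bi / 9)) (ki % 9) (by omega)
      · rw [if_pos (show ((ki % 9 : Nat) : Int) ≠ ((bi % 9 : Nat) : Int) from
            fun h => hcol (by exact_mod_cast h)),
          if_pos (show ki % 9 ≠ bi % 9 from hcol)]
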